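-- pv_equiv track=rewrite | github.com/LucasAlunoPD/desenvolve-python-basico | Modulo6/aula3_questao3.py | encontrar_intervalo_negativos
-- ===== SOURCE A (Python) =====
-- def encontrar_intervalo_negativos(lista):
--     max_intervalo = (0, 0)
--     inicio = None
--
--     for i, num in enumerate(lista):
--         if num < 0:
--             if inicio is None:
--                 inicio = i
--         else:
--             if inicio is not None:
--                 if (i - inicio) > (max_intervalo[1] - max_intervalo[0]):
--                     max_intervalo = (inicio, i)
--                 inicio = None
--
--     if inicio is not None and (len(lista) - inicio) > (max_intervalo[1] - max_intervalo[0]):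
--         max_intervalo = (inicio, len(lista))
--
--     return max_intervalo
-- ===== SOURCE B (Python) =====
-- from itertools import groupby
--
-- def encontrar_intervalo_negativos(lista):
--     best = (0, 0)
--     idx = 0
--     for neg, grp in groupby(lista, key=lambda x: x < 0):
--         n = sum(1 for _ in grp)
--         if neg and n > best[1] - best[0]:
--             best = (idx, idx + n)
--         idx += n
--     return best
-- ===== Notes on version B (the rewrite author's own statement) =====
-- stated objective: simpler
-- what changed: B splits the list into maximal sign-runs with itertools.groupby and folds over run lengths, replacing A's per-element state machine with an Option start index and its special end-of-list tail branch.
import Mathlib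
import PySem

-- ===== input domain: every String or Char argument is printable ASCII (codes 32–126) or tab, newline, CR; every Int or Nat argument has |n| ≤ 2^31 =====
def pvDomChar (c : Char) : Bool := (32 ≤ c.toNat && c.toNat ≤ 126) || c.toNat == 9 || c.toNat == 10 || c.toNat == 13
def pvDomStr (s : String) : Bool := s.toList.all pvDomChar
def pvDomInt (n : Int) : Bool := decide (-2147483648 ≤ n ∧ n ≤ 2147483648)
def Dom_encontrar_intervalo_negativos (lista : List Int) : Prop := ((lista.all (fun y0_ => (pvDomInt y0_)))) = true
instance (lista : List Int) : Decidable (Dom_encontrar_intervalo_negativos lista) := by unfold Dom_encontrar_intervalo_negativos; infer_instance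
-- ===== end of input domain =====

-- B replaces A's per-element state machine (Option start index + tail branch) by a
-- groupby-style fold over maximal sign-runs; same O(n) cost, plainer decomposition.

-- ===== PORT A =====
-- the for-loop of A, carrying (index, max_intervalo, inicio)
def aLoop (i : Int) (best : Int × Int) (inicio : Option Int) : List Int → (Int × Int) × Option Int
  | [] => (best, inicio)
  | num :: rest =>
    if num < 0 then
      aLoop (i + 1) best (match inicio with | none => some i | some s => some s) rest
    else
      match inicio with
      | some s => aLoop (i + 1) (if i - s > best.2 - best.1 then (s, i) else best) none rest
      | none => aLoop (i + 1) best none rest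

def encontrar_intervalo_negativos (lista : List Int) : Int × Int :=
  let st := aLoop 0 (0, 0) none lista
  match st.2 with
  | some s =>
      if (lista.length : Int) - s > st.1.2 - st.1.1 then (s, (lista.length : Int)) else st.1
  | none => st.1

-- ===== PORT B =====
-- itertools.groupby(lista, key=λ x, x < 0), each group as (key, length)
def spanKey (k : Bool) : List Int → Nat × List Int
  | [] => (0, [])
  | x :: xs =>
    if decide (x < 0) = k then
      let p := spanKey k xs
      (p.1 + 1, p.2)
    else (0, x :: xs)

theorem spanKey_len (k : Bool) : ∀ xs : List Int, (spanKey k xs).2.length ≤ xs.length := by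
  intro xs
  induction xs with
  | nil => simp [spanKey]
  | cons x xs ih =>
    simp only [spanKey]
    split
    · simpa using Nat.le_succ_of_le ih
    · simp

def runs : List Int → List (Bool × Nat)
  | [] => []
  | x :: xs =>
    let k := decide (x < 0)
    let p := spanKey k xs
    (k, p.1 + 1) :: runs p.2
termination_by l => l.length
decreasing_by
  simpa using Nat.lt_succ_of_le (spanKey_len (decide (x < 0)) xs)

def bStep (st : (Int × Int) × Int) (g : Bool × Nat) : (Int × Int) × Int :=
  let n : Int := (g.2 : Int)
  let best := if g.1 ∧ n > st.1.2 - st.1.1 then (st.2, st.2 + n) else st.1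
  (best, st.2 + n)

def encontrar_intervalo_negativos_alt (lista : List Int) : Int × Int :=
  ((runs lista).foldl bStep ((0, 0), 0)).1

-- ===== PRECONDITION & SPEC =====
def Spec_encontrar_intervalo_negativos (lista : List Int) (out : Int × Int) : Prop := out = encontrar_intervalo_negativos_alt lista
instance (lista : List Int) (out : Int × Int) : Decidable (Spec_encontrar_intervalo_negativos lista out) := by unfold Spec_encontrar_intervalo_negativos; infer_instance

-- ===== CLAIM (what is proved, stated in full; the proofs are below) =====
def Claim_equal_encontrar_intervalo_negativos : Prop := ∀ (lista : List Int), Dom_encontrar_intervalo_negativos lista → Spec_encontrar_intervalo_negativos lista (encontrar_intervalo_negativos lista)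

-- ===== LEMMAS AND PROOFS =====

-- A's trailing branch, applied after the loop, with the end index generalized
def afinal (st : (Int × Int) × Option Int) (e : Int) : Int × Int :=
  match st.2 with
  | some s => if e - s > st.1.2 - st.1.1 then (s, e) else st.1
  | none => st.1

theorem spanKey_decomp (k : Bool) :
    ∀ xs : List Int, ∃ run r, spanKey k xs = (run.length, r) ∧ xs = run ++ r ∧
      (∀ x ∈ run, decide (x < 0) = k) ∧ (∀ y, r.head? = some y → decide (y < 0) ≠ k) := by
  intro xs
  induction xs with
  | nil => exact ⟨[], [], by simp [spanKey]⟩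
  | cons x xs ih =>
    by_cases h : decide (x < 0) = k
    · obtain ⟨run, r, h1, h2, h3, h4⟩ := ih
      refine ⟨x :: run, r, ?_, by simp [h2], ?_, h4⟩
      · simp [spanKey, h, h1]
      · intro y hy
        rcases List.mem_cons.mp hy with rfl | hy'
        · exact h
        · exact h3 y hy'
    · exact ⟨[], x :: xs, by simp [spanKey, h], by simp, by simp, by simp [h]⟩

-- skipping a non-negative run with inicio = none
theorem aLoop_nonneg (run : List Int) (h : ∀ x ∈ run, decide (x < 0) = false) :
    ∀ (r : List Int) (i : Int) (best : Int × Int),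
      aLoop i best none (run ++ r) = aLoop (i + run.length) best none r := by
  induction run with
  | nil => simp
  | cons x run ih =>
    intro r i best
    have hx : ¬ x < 0 := by simpa using h x (by simp)
    have hr : ∀ x ∈ run, decide (x < 0) = false := fun x hx => h x (by simp [hx])
    simp only [List.cons_append, aLoop, if_neg hx]
    rw [ih hr r (i + 1) best]
    congr 1
    simp only [List.length_cons, Nat.cast_add, Nat.cast_one]
    ring

-- skipping a negative run with inicio = some s
theorem aLoop_neg (run : List Int) (h : ∀ x ∈ run, decide (x < 0) = true) :
    ∀ (r : List Int) (i s : Int) (best : Int × Int),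
      aLoop i best (some s) (run ++ r) = aLoop (i + run.length) best (some s) r := by
  induction run with
  | nil => simp
  | cons x run ih =>
    intro r i s best
    have hx : x < 0 := by simpa using h x (by simp)
    have hr : ∀ x ∈ run, decide (x < 0) = true := fun x hx => h x (by simp [hx])
    simp only [List.cons_append, aLoop, if_pos hx]
    rw [ih hr r (i + 1) s best]
    congr 1
    simp only [List.length_cons, Nat.cast_add, Nat.cast_one]
    ring

theorem bStep_true (b : Int × Int) (i : Int) (m : Nat) :
    bStep (b, i) (true, m) = ((if (m : Int) > b.2 - b.1 then (i, i + (m : Int)) else b), i + (m : Int)) := by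
  simp [bStep]

theorem bStep_false (b : Int × Int) (i : Int) (m : Nat) :
    bStep (b, i) (false, m) = (b, i + (m : Int)) := by
  simp [bStep]

-- the joint run-peeling invariant, by strong induction on the length
theorem main_inv : ∀ (len : Nat) (l : List Int), l.length = len →
    (∀ (i : Int) (best : Int × Int),
        afinal (aLoop i best none l) (i + l.length) = ((runs l).foldl bStep (best, i)).1) ∧
    (∀ (j s : Int) (best : Int × Int), (∀ y, l.head? = some y → ¬ y < 0) →
        afinal (aLoop j best (some s) l) (j + l.length)
          = ((runs l).foldl bStep ((if j - s > best.2 - best.1 then (s, j) else best), j)).1) := by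
  intro len
  induction len using Nat.strong_induction_on with
  | _ len ih =>
    intro l hlen
    constructor
    · intro i best
      match l with
      | [] => simp [aLoop, afinal, runs]
      | x :: xs =>
        obtain ⟨run, r, h1, h2, h3, h4⟩ := spanKey_decomp (decide (x < 0)) xs
        have hrlen : r.length < len := by
          have hsp := spanKey_len (decide (x < 0)) xs
          rw [h1] at hsp
          have : r.length ≤ xs.length := hsp
          simp only [List.length_cons] at hlen
          omega
        have hruns : runs (x :: xs) = (decide (x < 0), run.length + 1) :: runs r := by
          rw [runs]; simp [h1]
        have he : i + ((x :: xs).length : Int) = (i + 1 + run.length) + r.length := by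
          simp [h2]; ring
        by_cases hx : x < 0
        · -- negative run of length run.length + 1
          have hdx : decide (x < 0) = true := by simpa using hx
          have hneg : ∀ y ∈ run, decide (y < 0) = true := by
            intro y hy; rw [h3 y hy]; exact hdx
          have hA : aLoop i best none (x :: xs)
              = aLoop (i + 1 + run.length) best (some i) r := by
            simp only [aLoop, if_pos hx, h2]
            exact aLoop_neg run hneg r (i + 1) i best
          have hhead : ∀ y, r.head? = some y → ¬ y < 0 := by
            intro y hy hneg'
            exact (h4 y hy) (by rw [hdx]; simpa using hneg')
          have hN := ((ih r.length hrlen r rfl).2) (i + 1 + run.length) i best hhead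
          have hstate :
              ((if (i + 1 + (run.length : Int)) - i > best.2 - best.1 then (i, i + 1 + (run.length : Int)) else best),
                 i + 1 + (run.length : Int))
              = ((if ((run.length + 1 : Nat) : Int) > best.2 - best.1 then (i, i + ((run.length + 1 : Nat) : Int)) else best),
                 i + ((run.length + 1 : Nat) : Int)) := by
            have e1 : (i + 1 + (run.length : Int)) - i = ((run.length + 1 : Nat) : Int) := by
              push_cast; ring
            have e2 : i + 1 + (run.length : Int) = i + ((run.length + 1 : Nat) : Int) := by
              push_cast; ring
            rw [e1, e2]
          rw [hA, hruns, he, hN]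
          simp only [List.foldl_cons, hdx, bStep_true]
          rw [hstate]
        · -- non-negative run of length run.length + 1
          have hdx : decide (x < 0) = false := by simpa using hx
          have hnn : ∀ y ∈ run, decide (y < 0) = false := by
            intro y hy; rw [h3 y hy]; exact hdx
          have hA : aLoop i best none (x :: xs)
              = aLoop (i + 1 + run.length) best none r := by
            simp only [aLoop, if_neg hx, h2]
            exact aLoop_nonneg run hnn r (i + 1) best
          have hM := ((ih r.length hrlen r rfl).1) (i + 1 + run.length) best
          rw [hA, hruns, he, hM]
          simp only [List.foldl_cons, hdx, bStep_false]
          have e2 : i + 1 + (run.length : Int) = i + ((run.length + 1 : Nat) : Int) := by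
            push_cast; ring
          rw [e2]
    · intro j s best hhead
      match l with
      | [] => simp [aLoop, afinal, runs]
      | x :: xs =>
        have hx : ¬ x < 0 := hhead x rfl
        have hdx : decide (x < 0) = false := by simpa using hx
        obtain ⟨run, r, h1, h2, h3, h4⟩ := spanKey_decomp (decide (x < 0)) xs
        have hrlen : r.length < len := by
          have hsp := spanKey_len (decide (x < 0)) xs
          rw [h1] at hsp
          have : r.length ≤ xs.length := hsp
          simp only [List.length_cons] at hlen
          omega
        have hnn : ∀ y ∈ run, decide (y < 0) = false := by
          intro y hy; rw [h3 y hy]; exact hdx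
        have hruns : runs (x :: xs) = (decide (x < 0), run.length + 1) :: runs r := by
          rw [runs]; simp [h1]
        have he : j + ((x :: xs).length : Int) = (j + 1 + run.length) + r.length := by
          simp [h2]; ring
        have hA : aLoop j best (some s) (x :: xs)
            = aLoop (j + 1 + run.length) (if j - s > best.2 - best.1 then (s, j) else best) none r := by
          simp only [aLoop, if_neg hx, h2]
          exact aLoop_nonneg run hnn r (j + 1) _
        have hM := ((ih r.length hrlen r rfl).1) (j + 1 + run.length)
          (if j - s > best.2 - best.1 then (s, j) else best)
        rw [hA, hruns, he, hM]
        simp only [List.foldl_cons, hdx, bStep_false]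
        have e2 : j + 1 + (run.length : Int) = j + ((run.length + 1 : Nat) : Int) := by
          push_cast; ring
        rw [e2]

-- ===== VERDICT (by name: the statement is the Claim_ definition above) =====
theorem encontrar_intervalo_negativos_spec : Claim_equal_encontrar_intervalo_negativos := by
  intro lista _
  unfold Spec_encontrar_intervalo_negativos encontrar_intervalo_negativos encontrar_intervalo_negativos_alt
  have h := ((main_inv lista.length lista rfl).1) 0 (0, 0)
  simpa [afinal] using h
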